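-- pv_equiv track=rewrite | github.com/canlion/efficientdet | model/bifpn.py | get_features_size
-- ===== SOURCE A (Python) =====
-- from math import ceil
--
-- def get_features_size(input_size, max_level):
--     if isinstance(input_size, int):
--         features_size = [(input_size, input_size)]
--     else:
--         features_size = [input_size]
--     for level in range(1, max_level+1):
--         f_size = (ceil(features_size[-1][0] / 2), ceil(features_size[-1][1] / 2))
--         features_size.append(f_size)
--     return features_size[1:]
-- ===== SOURCE B (Python) =====
-- def get_features_size(input_size, max_level):
--     if isinstance(input_size, int):
--         w = h = input_size
--     else:
--         w, h = input_size
--     # ceil(x / 2**k) computed exactly in integers: -(-x >> k)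
--     return [(-(-w >> k), -(-h >> k)) for k in range(1, max_level + 1)]
-- ===== Notes on version B (the rewrite author's own statement) =====
-- stated objective: simpler
-- what changed: Replaces the accumulator loop that appends the ceil-half of the previous level (and then drops the seed with [1:]) by a direct per-level closed form ceil(x / 2**k) = -(-x >> k), computed in exact integer arithmetic.
import Mathlib
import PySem

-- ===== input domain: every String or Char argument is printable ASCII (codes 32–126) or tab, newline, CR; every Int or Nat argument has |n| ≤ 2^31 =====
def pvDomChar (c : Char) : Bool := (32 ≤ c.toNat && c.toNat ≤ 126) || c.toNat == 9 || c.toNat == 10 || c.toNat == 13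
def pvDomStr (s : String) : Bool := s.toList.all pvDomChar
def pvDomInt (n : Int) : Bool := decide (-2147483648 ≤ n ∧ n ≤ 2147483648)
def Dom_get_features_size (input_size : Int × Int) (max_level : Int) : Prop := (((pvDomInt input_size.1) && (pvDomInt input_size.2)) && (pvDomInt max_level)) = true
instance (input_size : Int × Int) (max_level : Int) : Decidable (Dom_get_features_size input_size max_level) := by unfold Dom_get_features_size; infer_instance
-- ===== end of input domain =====

-- B computes each level's size by the closed form ceil(x / 2**k) instead of A's
-- accumulator loop that appends the ceil-half of the previous level and drops the seed.

-- ===== PORT A =====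
-- ceil(x / 2): Python's ceil(x/2) (float division is exact for the iterated values, |x| ≤ 2^31)
def pyCeilHalf (x : Int) : Int := -(PySem.Int.floordiv (-x) 2)

def get_features_size (input_size : Int × Int) (max_level : Int) : List (Int × Int) :=
  -- input_size is a pair here, so A's isinstance branch selects 'features_size = [input_size]'
  let fs := (PySem.List.pyRange 1 (max_level + 1) 1).foldl
    (fun acc _level =>
      let last := acc.getLast?.getD (0, 0)   -- features_size[-1] (PySem.List.pyGet? acc (-1) = acc.getLast?; acc is never empty)
      acc ++ [(pyCeilHalf last.1, pyCeilHalf last.2)])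
    [input_size]
  PySem.List.slice fs (some 1) none          -- features_size[1:]

-- ===== PORT B =====
-- -(-x >> k): ceiling division of x by 2^k via Python's floor right-shift (k ≥ 1 in the loop)
def pyCeilShift (x k : Int) : Int := -(PySem.Int.floordiv (-x) (2 ^ k.toNat))

def get_features_size_alt (input_size : Int × Int) (max_level : Int) : List (Int × Int) :=
  (PySem.List.pyRange 1 (max_level + 1) 1).map
    (fun k => (pyCeilShift input_size.1 k, pyCeilShift input_size.2 k))

-- ===== PRECONDITION & SPEC =====
def Spec_get_features_size (input_size : Int × Int) (max_level : Int) (out : List (Int × Int)) : Prop := out = get_features_size_alt input_size max_level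
instance (input_size : Int × Int) (max_level : Int) (out : List (Int × Int)) : Decidable (Spec_get_features_size input_size max_level out) := by unfold Spec_get_features_size; infer_instance

-- ===== CLAIM (what is proved, stated in full; the proofs are below) =====
def Claim_equal_get_features_size : Prop := ∀ (input_size : Int × Int) (max_level : Int), Dom_get_features_size input_size max_level → Spec_get_features_size input_size max_level (get_features_size input_size max_level)

-- ===== LEMMAS AND PROOFS =====

-- one loop step of A
def pvStepA (acc : List (Int × Int)) : List (Int × Int) :=
  let last := acc.getLast?.getD (0, 0)
  acc ++ [(pyCeilHalf last.1, pyCeilHalf last.2)]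

def pvHalfPair (p : Int × Int) : Int × Int := (pyCeilHalf p.1, pyCeilHalf p.2)

lemma pvStepA_eq (acc : List (Int × Int)) (p : Int × Int) (h : acc.getLast? = some p) :
    pvStepA acc = acc ++ [pvHalfPair p] := by
  simp [pvStepA, pvHalfPair, h]

-- iterated ceil-halving = ceiling division by 2^k
lemma pvCeilHalf_iterate (x : Int) (k : Nat) :
    pyCeilHalf^[k] x = -(PySem.Int.floordiv (-x) (2 ^ k)) := by
  induction k with
  | zero =>
      show x = -(PySem.Int.floordiv (-x) 1)
      rw [PySem.Int.floordiv_eq_ediv_of_pos (by norm_num : (0:Int) < 1)]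
      simp
  | succ k ih =>
      rw [Function.iterate_succ_apply', ih]
      show -(PySem.Int.floordiv (- -(PySem.Int.floordiv (-x) (2 ^ k))) 2) = _
      rw [PySem.Int.floordiv_eq_ediv_of_pos (by positivity : (0:Int) < 2 ^ k),
          PySem.Int.floordiv_eq_ediv_of_pos (by norm_num : (0:Int) < 2),
          PySem.Int.floordiv_eq_ediv_of_pos (by positivity : (0:Int) < 2 ^ (k+1))]
      rw [neg_neg, Int.ediv_ediv_of_nonneg (le_of_lt (by positivity : (0:Int) < 2 ^ k))]
      ring_nf

lemma pvHalfPair_iterate (p : Int × Int) (k : Nat) :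
    pvHalfPair^[k] p = (pyCeilHalf^[k] p.1, pyCeilHalf^[k] p.2) := by
  induction k with
  | zero => simp
  | succ k ih =>
      rw [Function.iterate_succ_apply', ih, Function.iterate_succ_apply',
        Function.iterate_succ_apply']
      rfl

-- A's loop, characterised: fold over any index list of length n appends the first n iterates
lemma pvFoldA (l : List Int) : ∀ (acc : List (Int × Int)) (p : Int × Int),
    acc.getLast? = some p →
    l.foldl (fun a (_ : Int) => pvStepA a) acc
      = acc ++ (List.range l.length).map (fun j => pvHalfPair^[j + 1] p) := by
  induction l with
  | nil => intro acc p _; simp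
  | cons a l ih =>
      intro acc p h
      have h2 : (pvStepA acc).getLast? = some (pvHalfPair p) := by
        rw [pvStepA_eq acc p h]; simp
      simp only [List.foldl_cons]
      rw [ih (pvStepA acc) (pvHalfPair p) h2, pvStepA_eq acc p h]
      simp [List.range_succ_eq_map, List.map_map, Function.iterate_succ_apply]
      rw [← List.range_map_iterate]
      apply List.map_congr_left
      intro j _
      simp [Function.comp, Function.iterate_succ_apply]

lemma pvMain (input_size : Int × Int) (max_level : Int) :
    get_features_size input_size max_level = get_features_size_alt input_size max_level := by
  unfold get_features_size get_features_size_alt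
  rw [show (fun acc (_level : Int) =>
        let last := acc.getLast?.getD ((0:Int), (0:Int))
        acc ++ [(pyCeilHalf last.1, pyCeilHalf last.2)]) = fun a (_ : Int) => pvStepA a from rfl]
  rw [pvFoldA _ [input_size] input_size (by simp)]
  rw [PySem.List.slice_from_one]
  rw [PySem.List.pyRange_one]
  simp only [List.map_map, List.length_map, List.length_range, List.cons_append,
    List.nil_append, List.tail_cons]
  apply List.map_congr_left
  intro j _
  have ht : ((1 : Int) + (j : Int)).toNat = j + 1 := by omega
  simp only [Function.comp, pvHalfPair_iterate, pvCeilHalf_iterate, pyCeilShift, ht]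

-- ===== VERDICT (by name: the statement is the Claim_ definition above) =====
theorem get_features_size_spec : Claim_equal_get_features_size := by
  intro input_size max_level _
  unfold Spec_get_features_size
  exact pvMain input_size max_level
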